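-- pv_equiv track=rewrite | github.com/Ballistyxx/AICRL | modules/schematic_import.py | _generate_rl_connections
-- ===== SOURCE A (Python) =====
-- from typing import Optional, Dict, List, Any
--
-- def _generate_rl_connections(net_to_components: Dict[str, List[int]]) -> List[tuple]:
--     """Generate RL connections based on net connectivity."""
--     connections = []
--
--     # For each net, connect all components on that net
--     for net, component_ids in net_to_components.items():
--         if len(component_ids) >= 2:  # Need at least 2 components to make a connection
--             # Connect each component to every other component on the same net
--             for i in range(len(component_ids)):
--                 for j in range(i + 1, len(component_ids)):
--                     connection = (component_ids[i], component_ids[j])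
--                     if connection not in connections:
--                         connections.append(connection)
--
--     return connections
-- ===== SOURCE B (Python) =====
-- from typing import Optional, Dict, List, Any
--
-- def _generate_rl_connections(net_to_components: Dict[str, List[int]]) -> List[tuple]:
--     """Generate RL connections based on net connectivity.
--
--     Two-phase rewrite: first generate the flat stream of all pairs
--     (structural head/tail recursion over each net's component list, no index
--     arithmetic), then deduplicate once with dict.fromkeys (first occurrence)."""
--     all_pairs = []
--     for component_ids in net_to_components.values():
--         if len(component_ids) >= 2:
--             rest = list(component_ids)
--             while rest:
--                 a = rest.pop(0)
--                 all_pairs.extend((a, b) for b in rest)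
--     return list(dict.fromkeys(all_pairs))
-- ===== Notes on version B (the rewrite author's own statement) =====
-- stated objective: faster
-- what changed: A interleaves pair generation (nested index loops) with an O(n) membership scan of the growing result list for every candidate pair; B generates the flat pair stream by structural head/tail recursion per net and deduplicates once in a separate hash-based pass (dict.fromkeys).
import Mathlib
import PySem

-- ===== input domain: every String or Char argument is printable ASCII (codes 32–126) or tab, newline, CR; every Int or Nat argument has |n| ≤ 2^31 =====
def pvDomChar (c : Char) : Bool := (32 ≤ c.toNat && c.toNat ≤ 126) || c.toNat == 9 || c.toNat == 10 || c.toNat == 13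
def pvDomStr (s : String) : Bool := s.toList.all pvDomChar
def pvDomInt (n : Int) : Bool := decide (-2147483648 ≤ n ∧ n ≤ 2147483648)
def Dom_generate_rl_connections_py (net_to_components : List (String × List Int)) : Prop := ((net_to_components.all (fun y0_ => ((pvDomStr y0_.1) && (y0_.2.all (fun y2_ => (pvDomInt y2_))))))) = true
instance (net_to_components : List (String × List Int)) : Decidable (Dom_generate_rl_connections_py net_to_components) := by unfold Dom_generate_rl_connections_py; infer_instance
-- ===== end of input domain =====

-- B generates the flat pair stream per net by head/tail recursion and deduplicates once in a
-- separate dict.fromkeys pass, instead of A's nested index loops with a membership scan of the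
-- growing result for every candidate pair (objective: faster, in a timing run).


-- ===== PORT A =====
-- literal transliteration of A: for each net, nested index loops over range(len(ids)),
-- appending each pair unless it is already in the accumulated list.
-- ids[i] is ported as pyGetD (the index is always in range here, so it is exact).
def generate_rl_connections_py (net_to_components : List (String × List Int)) : List (Int × Int) :=
  net_to_components.foldl (fun connections net =>
    let component_ids := net.2
    if 2 ≤ component_ids.length then
      (PySem.List.pyRange 0 (component_ids.length : Int) 1).foldl (fun conns i =>
        (PySem.List.pyRange (i + 1) (component_ids.length : Int) 1).foldl (fun conns j =>
          if conns.contains (PySem.List.pyGetD component_ids i 0, PySem.List.pyGetD component_ids j 0)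
          then conns
          else conns ++ [(PySem.List.pyGetD component_ids i 0, PySem.List.pyGetD component_ids j 0)]) conns) connections
    else connections) []

-- ===== PORT B =====
-- the while-pop loop of Source B: pop(0) takes the head, then pair it with each remaining element
def pvPairsOf : List Int → List (Int × Int)
  | [] => []
  | a :: rest => rest.map (fun b => (a, b)) ++ pvPairsOf rest

-- literal transliteration of B: generate the flat list of pairs, then dedup = dict.fromkeys
def generate_rl_connections_py_alt (net_to_components : List (String × List Int)) : List (Int × Int) :=
  PySem.List.dedup
    (net_to_components.foldl (fun all_pairs net =>
      if 2 ≤ net.2.length then all_pairs ++ pvPairsOf net.2 else all_pairs) [])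

-- ===== PRECONDITION & SPEC =====
def Spec_generate_rl_connections_py (net_to_components : List (String × List Int)) (out : List (Int × Int)) : Prop := out = generate_rl_connections_py_alt net_to_components
instance (net_to_components : List (String × List Int)) (out : List (Int × Int)) : Decidable (Spec_generate_rl_connections_py net_to_components out) := by unfold Spec_generate_rl_connections_py; infer_instance

-- ===== CLAIM (what is proved, stated in full; the proofs are below) =====
def Claim_equal_generate_rl_connections_py : Prop := ∀ (net_to_components : List (String × List Int)), Dom_generate_rl_connections_py net_to_components → Spec_generate_rl_connections_py net_to_components (generate_rl_connections_py net_to_components)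

-- ===== LEMMAS AND PROOFS =====

-- A's append-unless-present loop over mapped elements is Set.update with the mapped list
theorem pv_foldl_add_map {α β : Type} [BEq α] (l : List β) (f : β → α) (s : PySem.Set α) :
    l.foldl (fun acc x => if acc.contains (f x) then acc else acc ++ [f x]) s
      = PySem.Set.update s (l.map f) := by
  rw [PySem.Set.update, List.foldl_map]
  simp [PySem.Set.add, PySem.Set.contains]

-- a fold of Set.update over per-element lists is one Set.update of the flattened stream
theorem pv_foldl_update_eq {α β : Type} [BEq α] (m : List β) (g : β → List α) (s : PySem.Set α) :
    m.foldl (fun acc x => PySem.Set.update acc (g x)) s = PySem.Set.update s (m.flatMap g) := by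
  induction m generalizing s with
  | nil => simp [PySem.Set.update]
  | cons x xs ih =>
    simp only [List.foldl_cons, List.flatMap_cons]
    rw [ih]
    simp [PySem.Set.update, List.foldl_append]

-- the Nat-indexed form of A's pair generation is the head/tail recursion pvPairsOf
theorem pv_range_flatMap (ids : List Int) :
    (List.range ids.length).flatMap
        (fun k => (ids.drop (k + 1)).map (fun b => (ids.getD k 0, b))) = pvPairsOf ids := by
  induction ids with
  | nil => rfl
  | cons a xs ih =>
    rw [List.length_cons, List.range_succ_eq_map]
    simp only [List.flatMap_cons, List.flatMap_map, Nat.succ_eq_add_one, List.drop_succ_cons,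
      List.getD_cons_succ, List.getD_cons_zero, List.drop_zero]
    rw [ih, pvPairsOf]

-- A's nested index loops generate, per net, exactly the pvPairsOf stream
theorem pv_pairsA_eq (ids : List Int) :
    ((PySem.List.pyRange 0 (ids.length : Int) 1).flatMap (fun i =>
      (PySem.List.pyRange (i + 1) (ids.length : Int) 1).map (fun j =>
        (PySem.List.pyGetD ids i 0, PySem.List.pyGetD ids j 0)))) = pvPairsOf ids := by
  have hinner : ∀ (k : Nat),
      (PySem.List.pyRange ((k : Int) + 1) (ids.length : Int) 1).map (fun j =>
        (PySem.List.pyGetD ids (k : Int) 0, PySem.List.pyGetD ids j 0))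
      = (ids.drop (k + 1)).map (fun b => (ids.getD k 0, b)) := by
    intro k
    have hmm : (PySem.List.pyRange ((k : Int) + 1) (ids.length : Int) 1).map (fun j =>
        (PySem.List.pyGetD ids (k : Int) 0, PySem.List.pyGetD ids j 0))
        = ((PySem.List.pyRange ((k : Int) + 1) (ids.length : Int) 1).map (fun j =>
            PySem.List.pyGetD ids j 0)).map (fun b => (PySem.List.pyGetD ids (k : Int) 0, b)) := by
      rw [List.map_map]; rfl
    rw [hmm, PySem.List.map_pyGetD_pyRange' ids 0 (a := (k : Int) + 1) (by omega)]
    have ht : ((k : Int) + 1).toNat = k + 1 := by omega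
    rw [ht, PySem.List.pyGetD_natCast]
  rw [PySem.List.pyRange_zero_nat, List.flatMap_map]
  simp only [hinner]
  exact pv_range_flatMap ids

-- A's whole inner block for one net, as a Set.update of its pair stream
theorem pv_net_inner (ids : List Int) (conns : List (Int × Int)) :
    (PySem.List.pyRange 0 (ids.length : Int) 1).foldl (fun conns i =>
        (PySem.List.pyRange (i + 1) (ids.length : Int) 1).foldl (fun conns j =>
          if conns.contains (PySem.List.pyGetD ids i 0, PySem.List.pyGetD ids j 0)
          then conns
          else conns ++ [(PySem.List.pyGetD ids i 0, PySem.List.pyGetD ids j 0)]) conns) conns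
      = PySem.Set.update conns (pvPairsOf ids) := by
  have h1 : ∀ (conns : List (Int × Int)), ∀ i ∈ PySem.List.pyRange 0 (ids.length : Int) 1,
      (PySem.List.pyRange (i + 1) (ids.length : Int) 1).foldl (fun conns j =>
          if conns.contains (PySem.List.pyGetD ids i 0, PySem.List.pyGetD ids j 0)
          then conns
          else conns ++ [(PySem.List.pyGetD ids i 0, PySem.List.pyGetD ids j 0)]) conns
        = PySem.Set.update conns ((PySem.List.pyRange (i + 1) (ids.length : Int) 1).map
            (fun j => (PySem.List.pyGetD ids i 0, PySem.List.pyGetD ids j 0))) := by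
    intro conns i _
    exact pv_foldl_add_map _ _ conns
  rw [PySem.List.foldl_congr_mem _ _ _ _ h1, pv_foldl_update_eq, pv_pairsA_eq]

theorem generate_rl_connections_py_spec_aux (m : List (String × List Int)) :
    generate_rl_connections_py m = generate_rl_connections_py_alt m := by
  unfold generate_rl_connections_py generate_rl_connections_py_alt
  have hA : ∀ (acc : List (Int × Int)), ∀ net ∈ m,
      (let component_ids := net.2
       if 2 ≤ component_ids.length then
        (PySem.List.pyRange 0 (component_ids.length : Int) 1).foldl (fun conns i =>
          (PySem.List.pyRange (i + 1) (component_ids.length : Int) 1).foldl (fun conns j =>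
            if conns.contains (PySem.List.pyGetD component_ids i 0, PySem.List.pyGetD component_ids j 0)
            then conns
            else conns ++ [(PySem.List.pyGetD component_ids i 0, PySem.List.pyGetD component_ids j 0)]) conns) acc
       else acc)
      = PySem.Set.update acc (if 2 ≤ net.2.length then pvPairsOf net.2 else []) := by
    intro acc net _
    dsimp only
    split_ifs with h
    · exact pv_net_inner net.2 acc
    · rfl
  have hB : ∀ (acc : List (Int × Int)), ∀ net ∈ m,
      (if 2 ≤ net.2.length then acc ++ pvPairsOf net.2 else acc)
      = acc ++ (if 2 ≤ net.2.length then pvPairsOf net.2 else []) := by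
    intro acc net _
    split_ifs with h <;> simp
  rw [PySem.List.foldl_congr_mem _ _ _ _ hA, pv_foldl_update_eq,
      PySem.List.foldl_congr_mem _ _ _ _ hB, PySem.List.foldl_append_eq_flatMap,
      PySem.List.dedup_eq_ofList, PySem.Set.ofList_eq_foldl]
  simp [PySem.Set.update]

-- ===== VERDICT (by name: the statement is the Claim_ definition above) =====
theorem generate_rl_connections_py_spec : Claim_equal_generate_rl_connections_py := by
  intro m _
  exact generate_rl_connections_py_spec_aux m
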